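-- pv_equiv track=rewrite | github.com/AdrianGabryla/pp1 | 04-Subroutines/Exercise44.py | f
-- ===== SOURCE A (Python) =====
-- def f(password):
--     tab = []
--     c = len(password)
--     for i in password:
--         tab.append(i)
--     for j in range(len(password)):
--         if password[j] in tab[j+1:]:
--             c = c - 1
--     if c >= 6:
--         return True
--     else:
--         return False
-- ===== SOURCE B (Python) =====
-- def f(password):
--     return len(set(password)) >= 6
-- ===== Notes on version B (the rewrite author's own statement) =====
-- stated objective: faster
-- what changed: Replaces the copy loop and the per-index tail-slice membership scans by a single hash-set construction: len(set(password)) >= 6.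
import Mathlib
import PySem

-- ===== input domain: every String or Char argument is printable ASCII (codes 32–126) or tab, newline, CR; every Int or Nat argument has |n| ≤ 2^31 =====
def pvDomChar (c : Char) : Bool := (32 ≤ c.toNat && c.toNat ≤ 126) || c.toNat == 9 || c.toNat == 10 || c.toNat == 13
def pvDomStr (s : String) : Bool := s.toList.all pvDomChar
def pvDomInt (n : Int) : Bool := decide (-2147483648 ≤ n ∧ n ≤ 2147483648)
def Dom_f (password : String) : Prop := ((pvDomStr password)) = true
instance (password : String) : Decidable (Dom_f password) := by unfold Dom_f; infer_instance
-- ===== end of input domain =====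

-- B replaces A's copy loop and quadratic tail-slice membership scans by len(set(password)) >= 6 (faster: one pass).

-- ===== PORT A =====
-- literal transliteration of A: build tab by appending each char, start c = len(password),
-- then for each index j subtract 1 when password[j] occurs in tab[j+1:], return c >= 6.
def f (password : String) : Bool :=
  let cs := password.toList
  let tab : List Char := cs.foldl (fun acc i => acc ++ [i]) []
  let c : Int := PySem.Str.len password
  let c := (PySem.List.pyRange 0 (PySem.Str.len password) 1).foldl
      (fun c j =>
        if (PySem.List.slice tab (some (j + 1)) none).contains (PySem.List.pyGetD cs j ' ') then
          c - 1
        else c) c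
  if c ≥ 6 then true else false

-- ===== PORT B =====
-- literal transliteration of B: len(set(password)) >= 6
def f_alt (password : String) : Bool :=
  decide ((PySem.Set.ofList password.toList).length ≥ 6)

-- ===== PRECONDITION & SPEC =====
def Spec_f (password : String) (out : Bool) : Prop := out = f_alt password
instance (password : String) (out : Bool) : Decidable (Spec_f password out) := by unfold Spec_f; infer_instance

-- ===== CLAIM (what is proved, stated in full; the proofs are below) =====
def Claim_equal_f : Prop := ∀ (password : String), Dom_f password → Spec_f password (f password)

-- ===== LEMMAS AND PROOFS =====

-- A set built from a list has as many elements as the list's dedup (both are nodup lists of the same members).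
theorem ofList_length_eq_dedup_length (l : List Char) :
    (PySem.Set.ofList l).length = l.dedup.length := by
  apply List.Perm.length_eq
  rw [List.perm_ext_iff_of_nodup (PySem.Set.nodup_ofList l) (List.nodup_dedup l)]
  intro a
  rw [PySem.Set.mem_ofList, List.mem_dedup]

-- A's main loop starting at index a: each j ≥ a with cs[j] occurring again later loses 1,
-- so it subtracts (length − #distinct) of the suffix cs.drop a.
theorem loopA (cs : List Char) (a : Nat) (c : Int) :
    (PySem.List.pyRange a (cs.length : Int) 1).foldl
      (fun c j =>
        if (PySem.List.slice cs (some (j + 1)) none).contains (PySem.List.pyGetD cs j ' ') then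
          c - 1
        else c) c
    = c - ((cs.drop a).length : Int) + ((cs.drop a).dedup.length : Int) := by
  by_cases h : a < cs.length
  · rw [PySem.List.pyRange_one_cons (by exact_mod_cast h)]
    simp only [List.foldl_cons]
    rw [show ((a : Int) + 1) = ((a + 1 : Nat) : Int) by push_cast; ring,
        PySem.List.slice_from_natCast, PySem.List.pyGetD_ofNat cs a ' ' h,
        List.drop_eq_getElem_cons h]
    by_cases hm : cs[a] ∈ cs.drop (a + 1)
    · rw [if_pos (by simpa using hm), List.dedup_cons_of_mem hm, loopA cs (a + 1) (c - 1)]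
      simp; omega
    · rw [if_neg (by simpa using hm), List.dedup_cons_of_notMem hm, loopA cs (a + 1) c]
      simp; omega
  · rw [PySem.List.pyRange_one_eq_nil (by exact_mod_cast Nat.le_of_not_lt h),
        List.drop_eq_nil_of_le (Nat.le_of_not_lt h)]
    simp
termination_by cs.length - a

-- ===== VERDICT (by name: the statement is the Claim_ definition above) =====
theorem f_spec : Claim_equal_f := by
  intro password _
  unfold Spec_f f f_alt
  simp only [PySem.List.foldl_append_singleton, List.nil_append]
  rw [show PySem.Str.len password = ((password.toList.length : Nat) : Int) by
        simp [PySem.Str.len_eq]]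
  have hl := loopA password.toList 0 (password.toList.length : Int)
  rw [Nat.cast_zero] at hl
  rw [hl, ofList_length_eq_dedup_length]
  simp only [List.drop_zero]
  by_cases h6 : (6 : Int) ≤ (password.toList.dedup.length : Int)
  · rw [if_pos (by omega), eq_comm, decide_eq_true_eq]; omega
  · rw [if_neg (by omega), eq_comm, decide_eq_false_iff_not]; omega
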